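-- pv_equiv track=rewrite | github.com/bitwitch/advent-of-code | aoc2021/08-seven-segment-search/seven_segments.py | segs_not_in_all
-- ===== SOURCE A (Python) =====
-- def segs_not_in_all(patterns):
--     union = set()
--     for digit in patterns:
--         union.update(digit)
--     intersection = patterns[0].copy()
--     for digit in patterns:
--         intersection.intersection_update(digit)
--     return union.difference(intersection)
-- ===== SOURCE B (Python) =====
-- def segs_not_in_all(patterns):
--     tally = {}
--     for pat in patterns:
--         for seg in pat:
--             tally[seg] = tally.get(seg, 0) + 1
--     n = len(patterns)
--     return {seg for seg in tally if tally[seg] < n}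
-- ===== Notes on version B (the rewrite author's own statement) =====
-- stated objective: idiomatic
-- what changed: Replaces the two set passes (union accumulation plus repeated intersection_update) by a single tally dict counting in how many patterns each segment occurs, returning the segments whose tally is below len(patterns).
-- outside the precondition, e.g. on segs_not_in_all([]): A raises IndexError, B returns set()
import Mathlib
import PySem

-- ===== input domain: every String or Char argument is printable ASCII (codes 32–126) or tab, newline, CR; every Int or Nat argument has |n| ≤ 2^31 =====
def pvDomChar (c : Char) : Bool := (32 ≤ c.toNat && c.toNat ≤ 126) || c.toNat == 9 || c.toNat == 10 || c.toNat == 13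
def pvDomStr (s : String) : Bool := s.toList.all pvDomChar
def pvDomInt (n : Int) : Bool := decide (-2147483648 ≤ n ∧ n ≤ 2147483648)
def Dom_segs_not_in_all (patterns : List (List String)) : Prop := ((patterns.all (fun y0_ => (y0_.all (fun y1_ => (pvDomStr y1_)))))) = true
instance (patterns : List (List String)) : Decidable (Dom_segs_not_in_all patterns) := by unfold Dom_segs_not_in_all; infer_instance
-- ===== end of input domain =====

-- B replaces A's two set passes (union accumulation + repeated intersection_update) by one
-- tally dict counting in how many patterns each segment occurs; idiomatic, same cost.
-- ===== PORT A =====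
-- 'union.update(digit)' / 'intersection.intersection_update(digit)' / 'union.difference(...)'
-- are PySem.Set.update / inter / diff; 'patterns[0]' is pyGetD (total form, used under Pre_).
def segs_not_in_all (patterns : List (List String)) : List String :=
  let union : PySem.Set String :=
    patterns.foldl (fun u digit => PySem.Set.update u digit) PySem.Set.empty
  let intersection : PySem.Set String :=
    patterns.foldl (fun i digit => PySem.Set.inter i digit) (PySem.List.pyGetD patterns 0 [])
  PySem.Set.diff union intersection

-- ===== PORT B =====
-- 'tally[seg] = tally.get(seg, 0) + 1' is Dict.insert with Dict.getD; the set comprehension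
-- over the dict's keys is Set.ofList of the filtered key list (keys iterate in insertion order).
def segs_not_in_all_alt (patterns : List (List String)) : List String :=
  let tally : PySem.Dict String Int :=
    patterns.foldl (fun d pat => pat.foldl (fun d seg => d.insert seg (d.getD seg 0 + 1)) d) PySem.Dict.empty
  let n : Int := patterns.length
  PySem.Set.ofList (tally.keys.filter (fun seg => tally.getD seg 0 < n))

-- ===== PRECONDITION & SPEC =====
-- Pre_ excludes the empty list, on which A raises IndexError at 'patterns[0]'; the Nodup
-- condition is the representation invariant of Python's set[str] arguments (each inner
-- list encodes a set, so it holds for every Python input).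
def Pre_segs_not_in_all (patterns : List (List String)) : Prop :=
  patterns ≠ [] ∧ ∀ p ∈ patterns, p.Nodup
instance (patterns : List (List String)) : Decidable (Pre_segs_not_in_all patterns) := by unfold Pre_segs_not_in_all; infer_instance
def pvWitness_segs_not_in_all : List (List String) := [["a"], ["a", "b"]]
def Spec_segs_not_in_all (patterns : List (List String)) (out : List String) : Prop := out = segs_not_in_all_alt patterns
instance (patterns : List (List String)) (out : List String) : Decidable (Spec_segs_not_in_all patterns out) := by unfold Spec_segs_not_in_all; infer_instance

-- ===== CLAIM (what is proved, stated in full; the proofs are below) =====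
def Claim_equal_segs_not_in_all : Prop := ∀ (patterns : List (List String)), Dom_segs_not_in_all patterns → Pre_segs_not_in_all patterns → Spec_segs_not_in_all patterns (segs_not_in_all patterns)

-- ===== LEMMAS AND PROOFS =====

-- the tally fold is a counter: its lookup counts occurrences
theorem getD_foldl_insert_inc (xs : List String) (d : PySem.Dict String Int) (seg : String) :
    (xs.foldl (fun d s => d.insert s (d.getD s 0 + 1)) d).getD seg 0
      = d.getD seg 0 + xs.count seg := by
  induction xs generalizing d with
  | nil => simp
  | cons x xs ih =>
    rw [List.foldl_cons, ih, PySem.Dict.getD_insert, List.count_cons]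
    by_cases h : seg = x
    · simp only [h, beq_self_eq_true, if_true]
      push_cast; ring
    · have hb : (x == seg) = false := by simp [Ne.symm h]
      simp [h, hb]

-- membership in the intersection fold
theorem mem_foldl_inter (ps : List (List String)) (init : List String) (seg : String) :
    seg ∈ ps.foldl (fun i digit => PySem.Set.inter i digit) init
      ↔ seg ∈ init ∧ ∀ p ∈ ps, seg ∈ p := by
  induction ps generalizing init with
  | nil => simp
  | cons p ps ih =>
    rw [List.foldl_cons, ih]
    simp only [PySem.Set.inter, PySem.Set.contains, List.mem_filter, List.contains_iff_mem,
      List.mem_cons]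
    constructor
    · rintro ⟨⟨h1, h2⟩, h3⟩
      exact ⟨h1, fun q hq => hq.elim (fun e => e ▸ h2) (h3 q)⟩
    · rintro ⟨h1, h2⟩
      exact ⟨⟨h1, h2 p (Or.inl rfl)⟩, fun q hq => h2 q (Or.inr hq)⟩

-- flatten count = number of patterns containing the segment (inner lists Nodup)
theorem count_flatten_eq_countP (ps : List (List String)) (hnd : ∀ p ∈ ps, p.Nodup) (seg : String) :
    ps.flatten.count seg = ps.countP (fun p => decide (seg ∈ p)) := by
  induction ps with
  | nil => simp
  | cons p ps ih =>
    simp only [List.flatten_cons, List.count_append, List.countP_cons]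
    rw [ih (fun q hq => hnd q (List.mem_cons_of_mem _ hq))]
    by_cases h : seg ∈ p
    · rw [List.count_eq_one_of_mem (hnd p (List.mem_cons_self ..)) h]
      simp [h, Nat.add_comm]
    · rw [List.count_eq_zero_of_not_mem h]
      simp [h]

-- ===== VERDICT (by name: the statement is the Claim_ definition above) =====
theorem segs_not_in_all_spec : Claim_equal_segs_not_in_all := by
  intro patterns _ hpre
  obtain ⟨hne, hnd⟩ := hpre
  unfold Spec_segs_not_in_all
  simp only [segs_not_in_all, segs_not_in_all_alt]
  -- both key structures are ofList of the flattened patterns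
  have hunion : patterns.foldl (fun u digit => PySem.Set.update u digit) PySem.Set.empty
      = PySem.Set.ofList patterns.flatten := by
    rw [PySem.Set.ofList_eq_foldl, List.foldl_flatten]; rfl
  have htally : patterns.foldl (fun d pat => pat.foldl (fun d seg => d.insert seg (d.getD seg 0 + 1)) d) (PySem.Dict.empty (κ := String) (ν := Int))
      = List.foldl (fun d seg => d.insert seg (d.getD seg 0 + 1)) (PySem.Dict.empty (κ := String) (ν := Int)) patterns.flatten := by
    rw [List.foldl_flatten]
  rw [hunion]
  rw [htally]
  have hkeys : (List.foldl (fun d seg => d.insert seg (d.getD seg 0 + 1)) (PySem.Dict.empty (κ := String) (ν := Int)) patterns.flatten).keys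
      = PySem.Set.ofList patterns.flatten := by
    rw [PySem.Dict.keys_foldl_insert patterns.flatten (fun d s => d.getD s 0 + 1)]
    rw [PySem.Set.ofList_eq_foldl]; rfl
  rw [hkeys]
  rw [PySem.Set.ofList_eq_self_of_nodup _
    (List.Nodup.filter _ (PySem.Set.nodup_ofList patterns.flatten))]
  unfold PySem.Set.diff
  apply List.filter_congr
  intro seg hseg
  have hsegmem : seg ∈ patterns.flatten := (PySem.Set.mem_ofList _ _).mp hseg
  rw [getD_foldl_insert_inc, PySem.Dict.getD_empty, zero_add]
  obtain ⟨h0, patterns, rfl⟩ : ∃ h t, patterns = h :: t := by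
    cases patterns with | nil => exact absurd rfl hne | cons h t => exact ⟨h, t, rfl⟩
  have hgd : PySem.List.pyGetD (h0 :: patterns) 0 [] = h0 := by
    simp [PySem.List.pyGetD, PySem.List.pyGet?, PySem.List.pyIdx?]
  rw [hgd]
  have hmem := mem_foldl_inter (h0 :: patterns) h0 seg
  have hcnt : List.count seg (h0 :: patterns).flatten
      = List.countP (fun p => decide (seg ∈ p)) (h0 :: patterns) :=
    count_flatten_eq_countP (h0 :: patterns) hnd seg
  have hle : List.countP (fun p => decide (seg ∈ p)) (h0 :: patterns) ≤ (h0 :: patterns).length :=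
    List.countP_le_length
  rw [hcnt]
  by_cases hall : ∀ p ∈ h0 :: patterns, seg ∈ p
  · have hc : List.countP (fun p => decide (seg ∈ p)) (h0 :: patterns) = (h0 :: patterns).length :=
      List.countP_eq_length.mpr (by simpa using hall)
    have hin : (List.foldl (fun i digit => PySem.Set.inter i digit) h0 (h0 :: patterns)).contains seg = true :=
      List.contains_iff_mem.mpr (hmem.mpr ⟨hall h0 (List.mem_cons_self ..), hall⟩)
    rw [hin, hc]
    simp
  · have hc : List.countP (fun p => decide (seg ∈ p)) (h0 :: patterns) < (h0 :: patterns).length := by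
      rcases lt_or_eq_of_le hle with h | h
      · exact h
      · exact absurd (List.countP_eq_length.mp h) (by simpa using hall)
    have hout : (List.foldl (fun i digit => PySem.Set.inter i digit) h0 (h0 :: patterns)).contains seg = false := by
      rw [Bool.eq_false_iff]
      intro hcontra
      exact hall (hmem.mp (List.contains_iff_mem.mp hcontra)).2
    have hcast : (↑(List.countP (fun p => decide (seg ∈ p)) (h0 :: patterns)) : Int)
        < ↑((h0 :: patterns).length) := by exact_mod_cast hc
    rw [hout, Bool.not_false, eq_comm, decide_eq_true_eq]
    exact hcast
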